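-- pv_equiv track=rewrite | github.com/vikasrh/neonew2 | migrate_historical_data.py | _find_prediction_time_column
-- ===== SOURCE A (Python) =====
-- def _find_prediction_time_column(table_cols: list[str]) -> str | None:
--     """
--     Your UI truncates the name; try common possibilities.
--     """
--     candidates = [
--         "prediction_time_utc",
--         "prediction_time",
--         "prediction_time_utc_text",
--         "prediction_time_timestamp",
--     ]
--     for c in candidates:
--         if c in table_cols:
--             return c
--
--     # fallback: any column starting with prediction_time
--     for c in table_cols:
--         if c.lower().startswith("prediction_time"):
--             return c
--
--     return None
-- ===== SOURCE B (Python) =====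
-- def _find_prediction_time_column(table_cols):
--     candidates = [
--         "prediction_time_utc",
--         "prediction_time",
--         "prediction_time_utc_text",
--         "prediction_time_timestamp",
--     ]
--     rank = {name: i for i, name in enumerate(candidates)}
--     best_rank = None
--     first_prefix = None
--     for col in table_cols:
--         r = rank.get(col)
--         if r is not None and (best_rank is None or r < best_rank):
--             best_rank = r
--         if first_prefix is None and col.lower().startswith("prediction_time"):
--             first_prefix = col
--     if best_rank is not None:
--         return candidates[best_rank]
--     return first_prefix
-- ===== Notes on version B (the rewrite author's own statement) =====
-- stated objective: alternative
-- what changed: Replaces A's two sequential scans (candidate-priority membership tests, then a prefix scan) with a single pass over table_cols that maintains the best candidate rank via a precomputed name-to-priority dict and the first prefix match simultaneously.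
import Mathlib
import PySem

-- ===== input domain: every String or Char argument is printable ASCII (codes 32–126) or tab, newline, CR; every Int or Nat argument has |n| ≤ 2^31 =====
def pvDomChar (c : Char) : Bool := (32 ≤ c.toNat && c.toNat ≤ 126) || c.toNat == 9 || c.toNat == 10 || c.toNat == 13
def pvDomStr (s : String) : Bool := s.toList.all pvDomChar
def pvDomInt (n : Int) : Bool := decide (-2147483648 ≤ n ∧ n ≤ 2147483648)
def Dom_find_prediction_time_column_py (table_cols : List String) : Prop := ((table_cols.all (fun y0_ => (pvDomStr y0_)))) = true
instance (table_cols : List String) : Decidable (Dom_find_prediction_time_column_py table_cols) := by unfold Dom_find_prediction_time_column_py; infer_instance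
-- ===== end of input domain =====

-- B replaces A's two sequential scans with one pass over table_cols using a name→priority dict
-- (tracking best candidate rank and first case-insensitive prefix match simultaneously); alternative decomposition, same results.


-- ===== PORT A =====
def pvCandidates : List String :=
  ["prediction_time_utc", "prediction_time", "prediction_time_utc_text", "prediction_time_timestamp"]

-- c.lower().startswith("prediction_time")
def pvPred (c : String) : Bool := PySem.Str.startswith (PySem.Str.lower c) "prediction_time"

-- A's first loop: for c in candidates: if c in table_cols: return c
def pvALoop1 (cands table_cols : List String) : Option String :=
  match cands with
  | [] => none
  | c :: rest => if table_cols.contains c then some c else pvALoop1 rest table_cols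

-- A's second loop: for c in table_cols: if c.lower().startswith("prediction_time"): return c
def pvALoop2 (cols : List String) : Option String :=
  match cols with
  | [] => none
  | c :: rest => if pvPred c then some c else pvALoop2 rest

def find_prediction_time_column_py (table_cols : List String) : Option String :=
  match pvALoop1 pvCandidates table_cols with
  | some c => some c
  | none => pvALoop2 table_cols

-- ===== PORT B =====
-- rank = {name: i for i, name in enumerate(candidates)}
def pvRank : PySem.Dict String Nat :=
  PySem.Dict.ofList (pvCandidates.zipIdx.map (fun p => (p.1, p.2)))

-- one iteration of B's loop: update (best_rank, first_prefix) with col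
def pvStep (s : Option Nat × Option String) (col : String) : Option Nat × Option String :=
  ( match pvRank.get? col with
    | some r =>
      match s.1 with
      | none => some r
      | some b => if r < b then some r else some b
    | none => s.1,
    match s.2 with
    | some _ => s.2
    | none => if pvPred col then some col else none )

def find_prediction_time_column_py_alt (table_cols : List String) : Option String :=
  let st := table_cols.foldl pvStep (none, none)
  match st.1 with
  | some i => PySem.List.pyGet? pvCandidates (Int.ofNat i)  -- candidates[best_rank]; i < 4 always, so this is `some _`
  | none => st.2

-- ===== PRECONDITION & SPEC =====
def Spec_find_prediction_time_column_py (table_cols : List String) (out : Option String) : Prop := out = find_prediction_time_column_py_alt table_cols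
instance (table_cols : List String) (out : Option String) : Decidable (Spec_find_prediction_time_column_py table_cols out) := by unfold Spec_find_prediction_time_column_py; infer_instance

-- ===== CLAIM (what is proved, stated in full; the proofs are below) =====
def Claim_equal_find_prediction_time_column_py : Prop := ∀ (table_cols : List String), Dom_find_prediction_time_column_py table_cols → Spec_find_prediction_time_column_py table_cols (find_prediction_time_column_py table_cols)

-- ===== LEMMAS AND PROOFS =====

-- first/second components of B's fold, in isolation
def pvStep1 (r : Option Nat) (col : String) : Option Nat :=
  match pvRank.get? col with
  | some v =>
    match r with
    | none => some v
    | some b => if v < b then some v else some b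
  | none => r

def pvStep2 (p : Option String) (col : String) : Option String :=
  match p with
  | some _ => p
  | none => if pvPred col then some col else none

lemma pvFold_pair (l : List String) (r : Option Nat) (p : Option String) :
    l.foldl pvStep (r, p) = (l.foldl pvStep1 r, l.foldl pvStep2 p) := by
  induction l generalizing r p with
  | nil => rfl
  | cons x xs ih =>
      simp only [List.foldl_cons]
      rw [show pvStep (r, p) x = (pvStep1 r x, pvStep2 p x) from rfl]
      exact ih _ _

-- rank lookup characterisation
lemma pvRank_eq : pvRank = PySem.Dict.mk
    [("prediction_time_utc", 0), ("prediction_time", 1),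
     ("prediction_time_utc_text", 2), ("prediction_time_timestamp", 3)] := by
  decide

lemma pvRank_get? (x : String) :
    pvRank.get? x =
      if "prediction_time_utc" = x then some 0
      else if "prediction_time" = x then some 1
      else if "prediction_time_utc_text" = x then some 2
      else if "prediction_time_timestamp" = x then some 3
      else none := by
  rw [pvRank_eq]
  simp only [PySem.Dict.get?_mk_cons, beq_iff_eq]
  split_ifs <;> simp [PySem.Dict.get?]

-- option-min combinator
def pvM (a b : Option Nat) : Option Nat :=
  match a, b with
  | none, b => b
  | some x, none => some x
  | some x, some y => some (min x y)

lemma pvStep1_eq_M (r : Option Nat) (x : String) : pvStep1 r x = pvM r (pvRank.get? x) := by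
  unfold pvStep1 pvM
  cases pvRank.get? x with
  | none => cases r <;> rfl
  | some v => cases r with
      | none => rfl
      | some b =>
          change (if v < b then some v else some b) = some (min b v)
          split_ifs with h <;> (congr 1; omega)

lemma pvM_none_right (a : Option Nat) : pvM a none = a := by cases a <;> rfl

lemma pvM_assoc (a b c : Option Nat) : pvM (pvM a b) c = pvM a (pvM b c) := by
  cases a <;> cases b <;> cases c <;> simp [pvM, Nat.min_assoc]

-- the fold of pvStep1 from r equals pvM r (fold from none)
lemma pvFold1_eq (l : List String) (r : Option Nat) :
    l.foldl pvStep1 r = pvM r (l.foldl pvStep1 none) := by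
  induction l generalizing r with
  | nil => simp [pvM_none_right]
  | cons x xs ih =>
      simp only [List.foldl_cons, pvStep1_eq_M]
      rw [ih (pvM r (pvRank.get? x)), ih (pvM none (pvRank.get? x)), pvM_assoc]
      rfl

def pvBest (l : List String) : Option Nat := l.foldl pvStep1 none

lemma pvBest_cons (x : String) (xs : List String) :
    pvBest (x :: xs) = pvM (pvRank.get? x) (pvBest xs) := by
  unfold pvBest
  simp only [List.foldl_cons, pvStep1_eq_M]
  rw [pvFold1_eq]
  rfl

lemma pvBest_some (l : List String) (i : Nat) (h : pvBest l = some i) :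
    ∃ x ∈ l, pvRank.get? x = some i := by
  induction l with
  | nil => simp [pvBest] at h
  | cons x xs ih =>
      rw [pvBest_cons] at h
      cases hx : pvRank.get? x with
      | none =>
          rw [hx] at h
          obtain ⟨y, hy, hyr⟩ := ih h
          exact ⟨y, List.mem_cons_of_mem _ hy, hyr⟩
      | some v =>
          rw [hx] at h
          cases hb : pvBest xs with
          | none =>
              rw [hb] at h
              simp [pvM] at h
              exact ⟨x, List.mem_cons_self, by rw [hx, h]⟩
          | some b =>
              rw [hb] at h
              simp [pvM] at h
              rcases Nat.le_total v b with hvb | hvb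
              · have hiv : v = i := by omega
                exact ⟨x, List.mem_cons_self, by rw [hx, hiv]⟩
              · have hib : pvBest xs = some i := by rw [hb]; congr 1; omega
                obtain ⟨y, hy, hyr⟩ := ih hib
                exact ⟨y, List.mem_cons_of_mem _ hy, hyr⟩

lemma pvBest_le (l : List String) (x : String) (j : Nat) (hx : x ∈ l)
    (hj : pvRank.get? x = some j) : ∃ i ≤ j, pvBest l = some i := by
  induction l with
  | nil => simp at hx
  | cons y ys ih =>
      rw [pvBest_cons]
      rcases List.mem_cons.mp hx with rfl | hmem
      · rw [hj]
        cases hb : pvBest ys with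
        | none => exact ⟨j, le_refl j, rfl⟩
        | some b => exact ⟨min j b, Nat.min_le_left j b, rfl⟩
      · obtain ⟨i, hi, hbi⟩ := ih hmem
        rw [hbi]
        cases hy : pvRank.get? y with
        | none => exact ⟨i, hi, rfl⟩
        | some v => exact ⟨min v i, le_trans (Nat.min_le_right v i) hi, rfl⟩

-- second component: fold of pvStep2 from none is A's second loop
lemma pvFold2_eq (l : List String) : l.foldl pvStep2 none = pvALoop2 l := by
  induction l with
  | nil => rfl
  | cons x xs ih =>
      simp only [List.foldl_cons, pvALoop2]
      cases hp : pvPred x with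
      | true =>
          have : ∀ (m : List String) (s : String), m.foldl pvStep2 (some s) = some s := by
            intro m
            induction m with
            | nil => intro s; rfl
            | cons z zs ihz => intro s; simpa [pvStep2] using ihz s
          simpa [pvStep2, hp] using this xs x
      | false => simpa [pvStep2, hp] using ih

-- membership of candidate i in l, given rank lookup, contradiction helpers
lemma pvBest_none_of_absent (l : List String)
    (h0 : "prediction_time_utc" ∉ l) (h1 : "prediction_time" ∉ l)
    (h2 : "prediction_time_utc_text" ∉ l) (h3 : "prediction_time_timestamp" ∉ l) :
    pvBest l = none := by
  cases hb : pvBest l with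
  | none => rfl
  | some i =>
      obtain ⟨x, hx, hr⟩ := pvBest_some l i hb
      rw [pvRank_get?] at hr
      split_ifs at hr with e0 e1 e2 e3
      · exact absurd (by rw [e0]; exact hx : "prediction_time_utc" ∈ l) h0
      · exact absurd (by rw [e1]; exact hx : "prediction_time" ∈ l) h1
      · exact absurd (by rw [e2]; exact hx : "prediction_time_utc_text" ∈ l) h2
      · exact absurd (by rw [e3]; exact hx : "prediction_time_timestamp" ∈ l) h3

lemma pvMem_of_rank (l : List String) (i : Nat) (hb : pvBest l = some i) :
    (i = 0 ∧ "prediction_time_utc" ∈ l) ∨ (i = 1 ∧ "prediction_time" ∈ l) ∨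
    (i = 2 ∧ "prediction_time_utc_text" ∈ l) ∨ (i = 3 ∧ "prediction_time_timestamp" ∈ l) := by
  obtain ⟨x, hx, hr⟩ := pvBest_some l i hb
  rw [pvRank_get?] at hr
  split_ifs at hr with e0 e1 e2 e3
  · exact Or.inl ⟨(Option.some.inj hr).symm, by rw [e0]; exact hx⟩
  · exact Or.inr (Or.inl ⟨(Option.some.inj hr).symm, by rw [e1]; exact hx⟩)
  · exact Or.inr (Or.inr (Or.inl ⟨(Option.some.inj hr).symm, by rw [e2]; exact hx⟩))
  · exact Or.inr (Or.inr (Or.inr ⟨(Option.some.inj hr).symm, by rw [e3]; exact hx⟩))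

-- main equivalence
lemma pvMain (l : List String) :
    find_prediction_time_column_py l = find_prediction_time_column_py_alt l := by
  unfold find_prediction_time_column_py find_prediction_time_column_py_alt
  rw [pvFold_pair]
  simp only []
  by_cases h0 : "prediction_time_utc" ∈ l
  · have ⟨i, hi, hb⟩ := pvBest_le l _ 0 h0 (by decide)
    interval_cases i
    rw [show l.foldl pvStep1 none = some 0 from hb]
    simp [pvALoop1, pvCandidates, h0, PySem.List.pyGet?, PySem.List.pyIdx?]
  · by_cases h1 : "prediction_time" ∈ l
    · have ⟨i, hi, hb⟩ := pvBest_le l _ 1 h1 (by decide)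
      have hne : i ≠ 0 := by
        intro rfl0
        rcases pvMem_of_rank l i (rfl0 ▸ hb) with ⟨_, hm⟩ | ⟨hi0, _⟩ | ⟨hi0, _⟩ | ⟨hi0, _⟩
        · exact h0 hm
        all_goals omega
      have : i = 1 := by omega
      subst this
      rw [show l.foldl pvStep1 none = some 1 from hb]
      simp [pvALoop1, pvCandidates, h0, h1, PySem.List.pyGet?, PySem.List.pyIdx?]
    · by_cases h2 : "prediction_time_utc_text" ∈ l
      · have ⟨i, hi, hb⟩ := pvBest_le l _ 2 h2 (by decide)
        have : i = 2 := by
          rcases pvMem_of_rank l i hb with ⟨hi0, hm⟩ | ⟨hi0, hm⟩ | ⟨hi0, hm⟩ | ⟨hi0, hm⟩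
          · exact absurd hm h0
          · exact absurd hm h1
          · exact hi0
          · omega
        subst this
        rw [show l.foldl pvStep1 none = some 2 from hb]
        simp [pvALoop1, pvCandidates, h0, h1, h2, PySem.List.pyGet?, PySem.List.pyIdx?]
      · by_cases h3 : "prediction_time_timestamp" ∈ l
        · have ⟨i, hi, hb⟩ := pvBest_le l _ 3 h3 (by decide)
          have : i = 3 := by
            rcases pvMem_of_rank l i hb with ⟨hi0, hm⟩ | ⟨hi0, hm⟩ | ⟨hi0, hm⟩ | ⟨hi0, hm⟩
            · exact absurd hm h0
            · exact absurd hm h1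
            · exact absurd hm h2
            · exact hi0
          subst this
          rw [show l.foldl pvStep1 none = some 3 from hb]
          simp [pvALoop1, pvCandidates, h0, h1, h2, h3, PySem.List.pyGet?, PySem.List.pyIdx?]
        · rw [show l.foldl pvStep1 none = none from pvBest_none_of_absent l h0 h1 h2 h3]
          simp [pvALoop1, pvCandidates, h0, h1, h2, h3, pvFold2_eq]

-- ===== VERDICT (by name: the statement is the Claim_ definition above) =====
theorem find_prediction_time_column_py_spec : Claim_equal_find_prediction_time_column_py := by
  intro l _
  exact pvMain l
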